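-- pv_equiv track=rewrite | github.com/miliar/Code_Jam_Webscraper | solutions_python/Problem_178/1240.py | count_changes
-- ===== SOURCE A (Python) =====
-- def count_changes(pancake_stack):
--     count = 0
--     for i, char in enumerate(pancake_stack):
--         if len(pancake_stack) > i+1 and pancake_stack[i+1] != char:
--             count += 1
--
--     if pancake_stack[len(pancake_stack)-1] == "-":
--         count += 1
--
--     return count
-- ===== SOURCE B (Python) =====
-- def count_changes(pancake_stack):
--     def trans(s):
--         n = len(s)
--         if n < 2:
--             return 0
--         if n == 2:
--             return 1 if s[0] != s[1] else 0
--         mid = n // 2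
--         return trans(s[:mid + 1]) + trans(s[mid:])
--
--     count = trans(pancake_stack)
--     if pancake_stack[-1] == "-":
--         count += 1
--     return count
-- ===== Notes on version B (the rewrite author's own statement) =====
-- stated objective: alternative
-- what changed: B counts adjacent differing pairs by divide and conquer - recursively splitting the string into two halves overlapping in one character and summing the two sub-counts - instead of A's single indexed left-to-right scan; the tail '-' check is unchanged.
import Mathlib
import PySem

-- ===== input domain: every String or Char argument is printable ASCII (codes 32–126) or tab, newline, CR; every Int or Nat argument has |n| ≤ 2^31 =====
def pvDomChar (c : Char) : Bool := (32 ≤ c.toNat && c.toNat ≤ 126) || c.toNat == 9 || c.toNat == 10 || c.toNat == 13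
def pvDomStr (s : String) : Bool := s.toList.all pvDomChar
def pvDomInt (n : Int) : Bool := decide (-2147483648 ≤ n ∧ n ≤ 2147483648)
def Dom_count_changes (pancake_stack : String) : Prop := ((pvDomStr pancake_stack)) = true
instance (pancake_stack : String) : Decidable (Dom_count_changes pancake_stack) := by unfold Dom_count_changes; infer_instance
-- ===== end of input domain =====

-- B counts adjacent differing pairs by divide and conquer (overlapping halves) instead of
-- A's single indexed scan; same result, different algorithm (no speed claim).

-- ===== PORT A =====
def count_changes (pancake_stack : String) : Int :=
  let l := pancake_stack.toList
  let count : Int :=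
    (PySem.List.enumerate l 0).foldl
      (fun count ic =>
        if ((l.length : Int) > ic.1 + 1 ∧ PySem.List.pyGetD l (ic.1 + 1) ' ' ≠ ic.2)
        then count + 1 else count)
      0
  if PySem.List.pyGetD l ((l.length : Int) - 1) ' ' = '-' then count + 1 else count

-- ===== PORT B =====
-- trans(s): n = len(s); n < 2 → 0; n == 2 → s[0] != s[1]; else split at mid = n // 2 into
-- s[:mid+1] and s[mid:] (exact for these nonnegative bounds: PySem.List.slice_to_natCast /
-- slice_from_natCast give List.take (mid+1) / List.drop mid).
def pvTrans (l : List Char) : Int :=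
  let n := l.length
  if n < 2 then 0
  else if n = 2 then
    (if PySem.List.pyGetD l 0 ' ' ≠ PySem.List.pyGetD l 1 ' ' then 1 else 0)
  else
    pvTrans (l.take (n / 2 + 1)) + pvTrans (l.drop (n / 2))
termination_by l.length
decreasing_by
  · simp only [List.length_take]; omega
  · simp only [List.length_drop]; omega

def count_changes_alt (pancake_stack : String) : Int :=
  let l := pancake_stack.toList
  let count : Int := pvTrans l
  if PySem.List.pyGetD l (-1) ' ' = '-' then count + 1 else count

-- ===== PRECONDITION & SPEC =====
-- Pre_ excludes only the empty string, on which A raises IndexError at pancake_stack[len-1]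
-- (B's pancake_stack[-1] raises there too).
def Pre_count_changes (pancake_stack : String) : Prop := pancake_stack ≠ ""
instance (pancake_stack : String) : Decidable (Pre_count_changes pancake_stack) := by
  unfold Pre_count_changes; infer_instance
def pvWitness_count_changes : String := "-+"
def Spec_count_changes (pancake_stack : String) (out : Int) : Prop := out = count_changes_alt pancake_stack
instance (pancake_stack : String) (out : Int) : Decidable (Spec_count_changes pancake_stack out) := by unfold Spec_count_changes; infer_instance

-- ===== CLAIM (what is proved, stated in full; the proofs are below) =====
def Claim_equal_count_changes : Prop := ∀ (pancake_stack : String), Dom_count_changes pancake_stack → Pre_count_changes pancake_stack → Spec_count_changes pancake_stack (count_changes pancake_stack)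

-- ===== LEMMAS AND PROOFS =====

-- Structural adjacent-difference count: the common spec both ports are reduced to.
def pvPairCount : List Char → Int
  | [] => 0
  | [_] => 0
  | c :: d :: r => (if c ≠ d then 1 else 0) + pvPairCount (d :: r)

-- A's loop counts the positions j < len-1 with l[j+1] ≠ l[j].
theorem count_changes_loop_eq_countP (l : List Char) (m : Nat) (hn : l.length = m + 1) :
    (PySem.List.enumerate l 0).foldl
      (fun count ic =>
        if ((l.length : Int) > ic.1 + 1 ∧ PySem.List.pyGetD l (ic.1 + 1) ' ' ≠ ic.2)
        then count + 1 else count) (0 : Int)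
    = ((List.range m).countP (fun j => decide (l.getD (j+1) ' ' ≠ l.getD j ' ')) : Int) := by
  rw [PySem.List.foldl_ite_add_one]
  rw [PySem.List.enumerate_eq_map_pyRange l ' ', List.countP_map]
  simp only [PySem.List.len_eq]
  rw [PySem.List.pyRange_zero_natCast, List.countP_map]
  simp only [Function.comp_def]
  rw [hn, List.range_succ, List.countP_append]
  have hsing : List.countP
      (fun x : Nat => decide (((m+1 : Nat) : Int) > (x:Int) + 1 ∧ PySem.List.pyGetD l ((x:Int) + 1) ' ' ≠ PySem.List.pyGetD l (x:Int) ' ')) [m] = 0 := by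
    simp
  rw [hsing, Nat.add_zero]
  have heq : List.countP
      (fun x : Nat => decide (((m+1 : Nat) : Int) > (x:Int) + 1 ∧ PySem.List.pyGetD l ((x:Int) + 1) ' ' ≠ PySem.List.pyGetD l (x:Int) ' '))
      (List.range m)
      = List.countP (fun j : Nat => decide (l.getD (j+1) ' ' ≠ l.getD j ' ')) (List.range m) := by
    apply List.countP_congr
    intro x hx
    have hx' : x < m := List.mem_range.mp hx
    have hc : ((x:Int) + 1) = (((x+1 : Nat)) : Int) := by push_cast; ring
    have hlt : ((m+1 : Nat) : Int) > (((x+1 : Nat)) : Int) := by exact_mod_cast Nat.succ_lt_succ hx'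
    rw [hc]
    simp only [PySem.List.pyGetD_natCast]
    simp only [decide_eq_true_eq]
    exact ⟨fun h => h.2, fun h => ⟨hlt, h⟩⟩
  rw [heq]
  ring

-- pvPairCount equals the same index-based count.
theorem pvPairCount_eq_countP (l : List Char) :
    pvPairCount l
    = ((List.range (l.length - 1)).countP (fun j => decide (l.getD (j+1) ' ' ≠ l.getD j ' ')) : Int) := by
  induction l with
  | nil => simp [pvPairCount]
  | cons c tl ih =>
    cases tl with
    | nil => simp [pvPairCount]
    | cons d r =>
      simp only [pvPairCount]
      rw [ih]
      have hlen : (c :: d :: r).length - 1 = ((d :: r).length - 1) + 1 := by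
        simp
      rw [hlen, List.range_succ_eq_map, List.countP_cons, List.countP_map]
      simp only [Function.comp_def]
      have h0 : (fun j : Nat => decide ((c :: d :: r).getD (j+1) ' ' ≠ (c :: d :: r).getD j ' ')) 0
          = decide (d ≠ c) := by simp
      have hstep : List.countP
          (fun x : Nat => decide ((c :: d :: r).getD (x+1+1) ' ' ≠ (c :: d :: r).getD (x+1) ' '))
          (List.range ((d :: r).length - 1))
          = List.countP (fun j : Nat => decide ((d :: r).getD (j+1) ' ' ≠ (d :: r).getD j ' '))
            (List.range ((d :: r).length - 1)) := by
        apply List.countP_congr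
        intro x _
        simp
      rw [hstep] at *
      push_cast
      by_cases h : c = d <;> simp [h, ne_comm] <;> ring
-- the overlapping split preserves the pair count
theorem pvPairCount_split (l : List Char) (k : Nat) (h1 : 1 ≤ k) (h2 : k < l.length) :
    pvPairCount (l.take (k+1)) + pvPairCount (l.drop k) = pvPairCount l := by
  induction l generalizing k with
  | nil => simp at h2
  | cons c tl ih =>
    match k, h1 with
    | 1, _ =>
      cases tl with
      | nil => simp at h2
      | cons d r =>
        simp only [List.take_succ_cons, List.take_succ_cons, List.take_zero,
          List.drop_succ_cons, List.drop_zero, pvPairCount]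
        ring
    | (k'+2), _ =>
      cases tl with
      | nil => simp at h2
      | cons d r =>
        have hk1 : 1 ≤ k' + 1 := by omega
        have hk2 : k' + 1 < (d :: r).length := by simp at h2 ⊢; omega
        have := ih (k'+1) hk1 hk2
        simp only [List.take_succ_cons, List.drop_succ_cons, pvPairCount] at this ⊢
        rw [add_assoc, this]

-- B's recursion computes pvPairCount.
theorem pvTrans_eq_pairCount (l : List Char) : pvTrans l = pvPairCount l := by
  induction hn : l.length using Nat.strong_induction_on generalizing l with
  | _ n ih =>
    subst hn
    unfold pvTrans
    by_cases h2 : l.length < 2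
    · match l, h2 with
      | [], _ => simp [pvPairCount]
      | [c], _ => simp [pvPairCount]
    · rw [if_neg h2]
      by_cases he : l.length = 2
      · rw [if_pos he]
        match l, he with
        | [c, d], _ =>
          simp [pvPairCount, PySem.List.pyGetD_ofNat']
      · rw [if_neg he]
        have h3 : 3 ≤ l.length := by omega
        have hta : (l.take (l.length / 2 + 1)).length < l.length := by
          simp only [List.length_take]; omega
        have hdr : (l.drop (l.length / 2)).length < l.length := by
          simp only [List.length_drop]; omega
        rw [ih _ hta _ rfl, ih _ hdr _ rfl]
        exact pvPairCount_split l (l.length / 2) (by omega) (by omega)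

-- ===== VERDICT (by name: the statement is the Claim_ definition above) =====
theorem count_changes_spec : Claim_equal_count_changes := by
  intro s _hdom hpre
  unfold Spec_count_changes count_changes count_changes_alt
  have hne : s.toList ≠ [] := by
    intro h
    apply hpre
    have := congrArg String.ofList h
    simpa using this
  obtain ⟨m, hn⟩ : ∃ m, s.toList.length = m + 1 := by
    have : s.toList.length ≠ 0 := by simpa using hne
    exact ⟨s.toList.length - 1, by omega⟩
  simp only []
  rw [count_changes_loop_eq_countP _ _ hn, pvTrans_eq_pairCount, pvPairCount_eq_countP, hn]
  have hm : m + 1 - 1 = m := by omega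
  rw [hm]
  have htail : PySem.List.pyGetD s.toList (((m+1 : Nat) : Int) - 1) ' '
      = PySem.List.pyGetD s.toList (-1) ' ' := by
    have hc : (((m+1 : Nat) : Int) - 1) = ((m : Nat) : Int) := by push_cast; ring
    have hml : m < s.toList.length := by omega
    rw [hc, PySem.List.pyGetD_natCast, PySem.List.pyGetD_neg_one (h := hne)]
    rw [List.getD_eq_getElem _ _ hml, List.getLast_eq_getElem]
    congr 1
    omega
  rw [htail]
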